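-- pv_equiv track=rewrite | github.com/naporium/GR241AG-GATEWAY-ALTICE-MEO_T1-master | ProjectUtilities/Gr241agUtilities.py | replace_chars_from_cmds
-- ===== SOURCE A (Python) =====
-- def replace_chars_from_cmds(string):
--     control_char = ['=', '/', ' ', '-']
--     output_string = ''
--     counter = 0
--     for _char in string:
--         if _char in control_char:
--             if counter == 0:
--                 output_string = output_string + "_"
--                 counter = counter + 1
--             else:
--                 output_string = output_string + ""
--                 counter = counter + 1
--         else:
--             counter = 0
--             output_string = output_string + _char
--     return output_string
-- ===== SOURCE B (Python) =====
-- def replace_chars_from_cmds(string):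
--     out = []
--     i = 0
--     n = len(string)
--     while i < n:
--         if string[i] in '=/ -':
--             out.append('_')
--             while i < n and string[i] in '=/ -':
--                 i += 1
--         else:
--             out.append(string[i])
--             i += 1
--     return ''.join(out)
-- ===== Notes on version B (the rewrite author's own statement) =====
-- stated objective: alternative
-- what changed: Replaces A's per-character stateful scan (counter tracking whether the previous char was a control char) with a run-skipping index loop that emits one underscore and then consumes each maximal control-char run at once, accumulating pieces in a list joined at the end.
import Mathlib
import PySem

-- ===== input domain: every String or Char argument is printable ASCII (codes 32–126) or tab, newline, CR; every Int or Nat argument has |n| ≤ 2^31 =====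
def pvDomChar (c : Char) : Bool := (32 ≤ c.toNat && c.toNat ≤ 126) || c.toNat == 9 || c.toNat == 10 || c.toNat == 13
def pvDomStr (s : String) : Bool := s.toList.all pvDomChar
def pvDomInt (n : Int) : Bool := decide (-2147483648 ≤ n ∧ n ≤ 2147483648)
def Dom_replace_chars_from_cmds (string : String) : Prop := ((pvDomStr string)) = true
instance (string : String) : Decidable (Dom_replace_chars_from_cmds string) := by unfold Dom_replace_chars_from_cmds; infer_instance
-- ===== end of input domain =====

-- ===== PORT A =====
-- B replaces A's per-character counter scan by a run-skipping index loop; return-value equivalence is proved on Dom.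

-- A's membership test `_char in control_char` (list of the four control chars)
def ctrlA (c : Char) : Bool := ['=', '/', ' ', '-'].contains c

-- the for-loop of A: state = (output_string, counter), one step per character
def loopA : List Char → String → Int → String
  | [], out, _ => out
  | c :: cs, out, counter =>
    if ctrlA c then
      if counter == 0 then loopA cs (out ++ "_") (counter + 1)
      else loopA cs (out ++ "") (counter + 1)
    else loopA cs (out.push c) 0

def replace_chars_from_cmds (string : String) : String :=
  loopA string.toList "" 0

-- ===== PORT B =====
-- B's membership test `string[i] in '=/ -'` (one character against the 4-char string)
def ctrlB (c : Char) : Bool := "=/ -".toList.contains c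

-- B's inner while loop: advance the index past the current run of control chars
def skipRun : List Char → List Char
  | [] => []
  | c :: cs => if ctrlB c then skipRun cs else c :: cs

theorem skipRun_length_le (l : List Char) : (skipRun l).length ≤ l.length := by
  induction l with
  | nil => simp [skipRun]
  | cons c cs ih =>
    simp only [skipRun]; split
    · simpa using Nat.le_succ_of_le ih
    · simp

-- B's outer while loop: emit '_' and skip the whole run, or emit the char;
-- B collects one-character pieces in a list and joins them, ported as a Char list
def goB : List Char → List Char
  | [] => []
  | c :: cs =>
    if ctrlB c then '_' :: goB (skipRun cs)
    else c :: goB cs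
  termination_by l => l.length
  decreasing_by
  · have := skipRun_length_le cs; simp; omega
  · simp

def replace_chars_from_cmds_alt (string : String) : String :=
  String.ofList (goB string.toList)

-- ===== PRECONDITION & SPEC =====
def Spec_replace_chars_from_cmds (string : String) (out : String) : Prop := out = replace_chars_from_cmds_alt string
instance (string : String) (out : String) : Decidable (Spec_replace_chars_from_cmds string out) := by unfold Spec_replace_chars_from_cmds; infer_instance

-- ===== CLAIM (what is proved, stated in full; the proofs are below) =====
def Claim_equal_replace_chars_from_cmds : Prop := ∀ (string : String), Dom_replace_chars_from_cmds string → Spec_replace_chars_from_cmds string (replace_chars_from_cmds string)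

-- ===== LEMMAS AND PROOFS =====

theorem ctrlA_eq_ctrlB (c : Char) : ctrlA c = ctrlB c := by
  have h : "=/ -".toList = ['=', '/', ' ', '-'] := by decide
  simp [ctrlA, ctrlB, h]

theorem goB_cons (c : Char) (cs : List Char) :
    goB (c :: cs) = if ctrlB c then '_' :: goB (skipRun cs) else c :: goB cs := by
  rw [goB]

-- Main invariant: counter = 0 means "not inside a control run" (A emits '_' on the
-- next control char); counter > 0 means the current run is already represented, so
-- A behaves like B restarted after skipping the rest of the run.
theorem loopA_characterization (l : List Char) :
    (∀ out, loopA l out 0 = out ++ String.ofList (goB l)) ∧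
    (∀ out (k : Int), 0 < k → loopA l out k = out ++ String.ofList (goB (skipRun l))) := by
  induction l with
  | nil =>
    constructor
    · intro out; apply String.toList_injective; simp [loopA, goB]
    · intro out k _; apply String.toList_injective; simp [loopA, skipRun, goB]
  | cons c cs ih =>
    obtain ⟨ihP, ihQ⟩ := ih
    constructor
    · intro out
      by_cases hc : ctrlB c = true
      · simp only [loopA, ctrlA_eq_ctrlB, hc, if_true]
        norm_num
        rw [ihQ (out ++ "_") 1 (by norm_num), goB_cons, if_pos hc]
        apply String.toList_injective; simp
      · simp only [loopA, ctrlA_eq_ctrlB, hc, Bool.false_eq_true, if_false]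
        rw [ihP (out.push c), goB_cons, if_neg hc]
        apply String.toList_injective; simp
    · intro out k hk
      by_cases hc : ctrlB c = true
      · simp only [loopA, ctrlA_eq_ctrlB, hc, if_true]
        rw [show (k == 0) = false by simp; omega, if_neg (by simp),
            ihQ (out ++ "") (k + 1) (by omega)]
        simp only [skipRun, hc, if_true]
        apply String.toList_injective; simp
      · simp only [loopA, ctrlA_eq_ctrlB, hc, Bool.false_eq_true, if_false]
        rw [ihP (out.push c)]
        simp only [skipRun, hc, Bool.false_eq_true, if_false]
        rw [goB_cons, if_neg hc]
        apply String.toList_injective; simp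

-- ===== VERDICT (by name: the statement is the Claim_ definition above) =====
theorem replace_chars_from_cmds_spec : Claim_equal_replace_chars_from_cmds := by
  intro string _
  unfold Spec_replace_chars_from_cmds replace_chars_from_cmds replace_chars_from_cmds_alt
  rw [(loopA_characterization string.toList).1 ""]
  apply String.toList_injective; simp
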